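-- pv_equiv track=rewrite | github.com/avielmoshe/Introduction-to-Computer-Science | homework10.py | has_switched_couple
-- ===== SOURCE A (Python) =====
-- def has_switched_couple(number):
--     if number < 10:
--         return False
--
--     last_digit = number % 10
--     prev_digit = (number // 10) % 10
--
--     if (last_digit % 2) != (prev_digit % 2):
--         return True
--
--     return has_switched_couple(number // 10)
-- ===== SOURCE B (Python) =====
-- def has_switched_couple(number):
--     # A pair of adjacent digits with different parity exists iff some digit's
--     # parity differs from the last digit's parity: compare every digit to it.
--     if number < 10:
--         return False
--     p = number % 2
--     n = number
--     while n > 0: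
--         if (n % 10) % 2 != p:
--             return True
--         n //= 10
--     return False
-- ===== Notes on version B (the rewrite author's own statement) =====
-- stated objective: alternative
-- what changed: Replaces the recursion comparing each adjacent digit pair with a single iterative loop comparing every digit's parity against the last digit's parity (adjacent parities all agree iff all digits share one parity).
import Mathlib
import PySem

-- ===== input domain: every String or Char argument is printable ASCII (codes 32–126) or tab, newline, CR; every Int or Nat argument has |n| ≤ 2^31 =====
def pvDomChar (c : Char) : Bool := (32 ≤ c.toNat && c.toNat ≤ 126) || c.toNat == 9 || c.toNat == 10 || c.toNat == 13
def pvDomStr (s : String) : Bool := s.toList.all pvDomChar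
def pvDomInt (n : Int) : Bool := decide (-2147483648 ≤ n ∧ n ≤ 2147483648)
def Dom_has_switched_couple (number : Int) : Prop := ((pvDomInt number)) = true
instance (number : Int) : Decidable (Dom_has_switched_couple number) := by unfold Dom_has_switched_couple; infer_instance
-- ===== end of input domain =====

-- ===== PORT A =====
-- B compares each digit's parity to the last digit's parity instead of recursing over adjacent pairs; same return value, no side effects.
def has_switched_couple (number : Int) : Bool :=
  if _h : number < 10 then false
  else
    let last_digit := PySem.Int.mod number 10
    let prev_digit := PySem.Int.mod (PySem.Int.floordiv number 10) 10
    if PySem.Int.mod last_digit 2 != PySem.Int.mod prev_digit 2 then true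
    else has_switched_couple (PySem.Int.floordiv number 10)
termination_by number.toNat
decreasing_by
  rw [PySem.Int.floordiv_eq_ediv_of_pos (by norm_num)]
  omega

-- ===== PORT B =====
def pvAltLoop (n : Int) (p : Int) : Bool :=
  if _h : n > 0 then
    if PySem.Int.mod (PySem.Int.mod n 10) 2 != p then true
    else pvAltLoop (PySem.Int.floordiv n 10) p
  else false
termination_by n.toNat
decreasing_by
  rw [PySem.Int.floordiv_eq_ediv_of_pos (by norm_num)]
  omega

def has_switched_couple_alt (number : Int) : Bool :=
  if number < 10 then false
  else pvAltLoop number (PySem.Int.mod number 2)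

-- ===== PRECONDITION & SPEC =====
def Spec_has_switched_couple (number : Int) (out : Bool) : Prop := out = has_switched_couple_alt number
instance (number : Int) (out : Bool) : Decidable (Spec_has_switched_couple number out) := by unfold Spec_has_switched_couple; infer_instance

-- ===== CLAIM (what is proved, stated in full; the proofs are below) =====
def Claim_equal_has_switched_couple : Prop := ∀ (number : Int), Dom_has_switched_couple number → Spec_has_switched_couple number (has_switched_couple number)

-- ===== LEMMAS AND PROOFS =====

theorem pv_m10 (a : Int) : PySem.Int.mod a 10 = a % 10 := by
  rw [PySem.Int.mod_eq_emod_of_pos] ; omega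

theorem pv_m2 (a : Int) : PySem.Int.mod a 2 = a % 2 := by
  rw [PySem.Int.mod_eq_emod_of_pos] ; omega

theorem pv_d10 (a : Int) : PySem.Int.floordiv a 10 = a / 10 := by
  rw [PySem.Int.floordiv_eq_ediv_of_pos] ; omega

-- main bridge: for n >= 10, A's recursion equals B's loop started at n/10 with p = n % 2
theorem main_bridge (n : Int) (hn : 10 ≤ n) :
    has_switched_couple n = pvAltLoop (n / 10) (n % 2) := by
  have H : ∀ k : Nat, ∀ m : Int, m.toNat ≤ k → 10 ≤ m →
      has_switched_couple m = pvAltLoop (m / 10) (m % 2) := by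
    intro k
    induction k with
    | zero => intro m hm h10; omega
    | succ k ih =>
      intro m hm h10
      rw [has_switched_couple.eq_def, pvAltLoop.eq_def]
      simp only [pv_m10, pv_m2, pv_d10]
      rw [dif_neg (by omega : ¬ m < 10), dif_pos (show m / 10 > 0 by omega)]
      have hq : m % 10 % 2 = m % 2 := by omega
      rw [hq]
      by_cases hsame : m / 10 % 10 % 2 = m % 2
      · simp only [hsame, bne_self_eq_false, Bool.false_eq_true, if_false]
        by_cases hsmall : m / 10 < 10
        · rw [has_switched_couple.eq_def, pvAltLoop.eq_def]
          simp only [pv_m10, pv_m2, pv_d10]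
          rw [dif_pos hsmall, dif_neg (show ¬ m / 10 / 10 > 0 by omega)]
        · have hih := ih (m / 10) (by omega) (by omega)
          have h2 : m / 10 % 2 = m % 2 := by omega
          rw [hih, h2]
      · have hA : (m % 2 != m / 10 % 10 % 2) = true := by
          simp only [bne_iff_ne, ne_eq]; omega
        have hB : (m / 10 % 10 % 2 != m % 2) = true := by
          simp only [bne_iff_ne, ne_eq]; omega
        rw [if_pos hA, if_pos hB]
  exact H n.toNat n le_rfl hn

-- ===== VERDICT (by name: the statement is the Claim_ definition above) =====
theorem has_switched_couple_spec : Claim_equal_has_switched_couple := by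
  intro number _
  unfold Spec_has_switched_couple has_switched_couple_alt
  by_cases h : number < 10
  · rw [if_pos h, has_switched_couple.eq_def, dif_pos h]
  · rw [if_neg h, pvAltLoop.eq_def]
    simp only [pv_m10, pv_m2, pv_d10]
    rw [dif_pos (by omega : number > 0)]
    have e : number % 10 % 2 = number % 2 := by omega
    simp only [e, bne_self_eq_false, Bool.false_eq_true, if_false]
    exact main_bridge number (by omega)
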